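-- pv_equiv track=rewrite | github.com/radu-gajdos/IG1 | FP/sem11.py | doi
-- ===== SOURCE A (Python) =====
-- def doi(l):
--     if len(l)<1:
--         return l
--     else:
--         if l[0]==0:
--             return [0] + doi(l[1:])
--         else:
--             return doi(l[1:]) + [1]
-- ===== SOURCE B (Python) =====
-- def doi(l):
--     z = l.count(0)
--     return [0] * z + [1] * (len(l) - z)
-- ===== Notes on version B (the rewrite author's own statement) =====
-- stated objective: faster
-- what changed: Replaced the quadratic recursion (slicing and list concatenation per element) by a single count of the zeros followed by a closed-form construction of that many zeros and ones for the rest.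
import Mathlib
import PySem

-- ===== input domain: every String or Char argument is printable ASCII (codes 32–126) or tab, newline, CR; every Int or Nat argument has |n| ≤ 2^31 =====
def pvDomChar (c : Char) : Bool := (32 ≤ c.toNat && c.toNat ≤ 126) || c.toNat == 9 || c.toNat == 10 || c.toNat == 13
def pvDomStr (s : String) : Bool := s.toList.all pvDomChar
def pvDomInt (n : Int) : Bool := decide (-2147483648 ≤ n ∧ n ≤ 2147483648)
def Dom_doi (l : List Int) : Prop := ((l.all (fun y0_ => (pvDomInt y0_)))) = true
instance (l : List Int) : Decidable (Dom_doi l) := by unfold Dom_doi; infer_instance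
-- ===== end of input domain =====

-- B is faster by a different algorithm: one count of zeros and a closed-form build, instead of A's quadratic recursion.

-- ===== PORT A =====
def doi (l : List Int) : List Int :=
  match l with
  | [] => []
  | x :: xs => if x == 0 then 0 :: doi xs else doi xs ++ [1]

-- ===== PORT B =====
def doi_alt (l : List Int) : List Int :=
  let z := l.count 0
  List.replicate z 0 ++ List.replicate (l.length - z) 1

-- ===== PRECONDITION & SPEC =====
def Spec_doi (l : List Int) (out : List Int) : Prop := out = doi_alt l
instance (l : List Int) (out : List Int) : Decidable (Spec_doi l out) := by unfold Spec_doi; infer_instance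

-- ===== CLAIM (what is proved, stated in full; the proofs are below) =====
def Claim_equal_doi : Prop := ∀ (l : List Int), Dom_doi l → Spec_doi l (doi l)

-- ===== LEMMAS AND PROOFS =====
theorem doi_eq_alt (l : List Int) : doi l = doi_alt l := by
  induction l with
  | nil => rfl
  | cons x xs ih =>
    have hz : xs.count 0 ≤ xs.length := List.count_le_length
    by_cases hx : x = 0
    · simp [doi, doi_alt, hx, ih, List.replicate_succ]
    · have hx' : (x == 0) = false := by simp [hx]
      simp only [doi, doi_alt, hx', ih, List.count_cons, List.length_cons,
        if_neg (by simp : ¬ (false = true)), Nat.add_zero]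
      rw [show xs.length + 1 - xs.count 0 = (xs.length - xs.count 0) + 1 by omega,
        List.replicate_succ' (n := xs.length - xs.count 0)]
      simp

-- ===== VERDICT (by name: the statement is the Claim_ definition above) =====
theorem doi_spec : Claim_equal_doi := by
  intro l _; exact doi_eq_alt l
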